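-- pv_equiv track=rewrite | github.com/bjornwallner/ProQDock | run_ProQDock.py | fix_his
-- ===== SOURCE A (Python) =====
-- def fix_his(pdb_str):
--
--     res_map={}
--     old_resnum='undef'
--     old_res='UNK'
--     residues=[]
--     pdb=[]
--     d=0
--     e=0
--     for line in pdb_str.split('\n')[:-1]:
--         if line.startswith('ATOM'):
--             atom=line[12:16].strip()
--             res=line[17:20]
--             resnum=line[22:26]
--             if  resnum != old_resnum and old_resnum != 'undef': # new res
--                 if old_res =='HIS':
--                     his='HID'
--                     if d == 1 and e == 1:
--                         his='HIP'
--                     if d == 0 and e == 1: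
--                         his='HIE'
--                     residues=[line.replace('HIS',his) for line in residues]
--                 pdb+=residues
--                 residues=[]
--                 d=0
--                 e=0
--
--             if res=='HIS':
--                 if atom == 'HD1':
--                     d=1
--                 elif atom == 'HE2':
--                     e=1
--             old_resnum=resnum
--             old_res=res
--             residues.append(line+'\n')
--
--     if len(residues) > 0:
--         if old_res == 'HIS':
--             his='HID'
--             if d == 1 and e == 1:
--                 his='HIP'
--             if d == 0 and e == 1:
--                 his='HIE'
--             residues=[line.replace('HIS',his) for line in residues]
--         pdb+=residues
--
--     return("".join(pdb))
-- ===== SOURCE B (Python) =====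
-- def fix_his(pdb_str):
--     # parse-group-classify-render pipeline: parse each ATOM line once into
--     # (resnum, resname, atomname, line+'\n'), group consecutive equal resnums
--     # into blocks, classify each block's HIS protonation with any() scans,
--     # then render all blocks.
--     atoms = [(l[22:26], l[17:20], l[12:16].strip(), l + '\n')
--              for l in pdb_str.split('\n')[:-1] if l.startswith('ATOM')]
--     blocks = []
--     cur = []
--     for a in atoms:
--         if cur and cur[-1][0] != a[0]:
--             blocks.append(cur)
--             cur = [a]
--         else:
--             cur.append(a)
--     if cur:
--         blocks.append(cur)
--     out = []
--     for block in blocks: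
--         if block[-1][1] == 'HIS':
--             d = any(res == 'HIS' and atom == 'HD1' for _, res, atom, _ in block)
--             e = any(res == 'HIS' and atom == 'HE2' for _, res, atom, _ in block)
--             his = 'HIP' if d and e else ('HIE' if e else 'HID')
--             out.extend(s.replace('HIS', his) for _, _, _, s in block)
--         else:
--             out.extend(s for _, _, _, s in block)
--     return ''.join(out)
-- ===== Notes on version B (the rewrite author's own statement) =====
-- stated objective: alternative
-- what changed: Replaces A's single-pass state machine (inline d/e flags, flush-on-resnum-change buffer, repeated relabel block) by a parse/group/classify/render pipeline: each ATOM line is parsed once into a (resnum, resname, atomname, line) record, records are grouped into explicit consecutive residue blocks, each block is classified with any() scans and rendered.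
import Mathlib
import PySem

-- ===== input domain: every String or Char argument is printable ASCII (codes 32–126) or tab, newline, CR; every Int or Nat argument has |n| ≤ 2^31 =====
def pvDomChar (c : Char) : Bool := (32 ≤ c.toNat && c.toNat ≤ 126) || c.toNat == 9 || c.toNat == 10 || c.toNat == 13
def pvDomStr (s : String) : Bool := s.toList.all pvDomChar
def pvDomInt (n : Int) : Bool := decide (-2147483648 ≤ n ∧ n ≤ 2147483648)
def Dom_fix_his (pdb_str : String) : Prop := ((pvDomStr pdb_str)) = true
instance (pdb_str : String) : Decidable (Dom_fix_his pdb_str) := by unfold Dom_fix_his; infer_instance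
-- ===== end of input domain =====

-- B replaces A's single-pass state machine (inline flags, flush-on-change buffer) by a
-- parse / group / classify / render pipeline over explicit residue blocks; objective: alternative.

-- ===== PORT A =====
-- A's HIS-relabelling block (appears verbatim twice in A: at flush and at the end)
def fixHisRelabel (d e : Int) (residues : List String) : List String :=
  let his := "HID"
  let his := if d == 1 && e == 1 then "HIP" else his
  let his := if d == 0 && e == 1 then "HIE" else his
  residues.map (fun l => PySem.Str.replace l "HIS" his)

-- body of A's for-loop; state = (old_resnum, old_res, residues, pdb, d, e)
def fixHisStep (st : String × String × List String × List String × Int × Int)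
    (line : String) : String × String × List String × List String × Int × Int :=
  let (old_resnum, old_res, residues, pdb, d, e) := st
  if PySem.Str.startswith line "ATOM" then
    let atom := PySem.Str.strip (PySem.Str.slice line (some 12) (some 16))
    let res := PySem.Str.slice line (some 17) (some 20)
    let resnum := PySem.Str.slice line (some 22) (some 26)
    let (residues, pdb, d, e) :=
      if resnum ≠ old_resnum ∧ old_resnum ≠ "undef" then
        let residues := if old_res = "HIS" then fixHisRelabel d e residues else residues
        (([] : List String), pdb ++ residues, (0 : Int), (0 : Int))
      else (residues, pdb, d, e)
    let (d, e) :=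
      if res = "HIS" then
        if atom = "HD1" then ((1 : Int), e)
        else if atom = "HE2" then (d, (1 : Int))
        else (d, e)
      else (d, e)
    (resnum, res, residues ++ [line ++ "\n"], pdb, d, e)
  else st

def fix_his (pdb_str : String) : String :=
  let st := (PySem.List.slice ((PySem.Str.split? pdb_str "\n").getD []) none (some (-1))).foldl
      fixHisStep ("undef", "UNK", [], [], 0, 0)
  let (_old_resnum, old_res, residues, pdb, d, e) := st
  let pdb :=
    if residues.length > 0 then
      pdb ++ (if old_res = "HIS" then fixHisRelabel d e residues else residues)
    else pdb
  PySem.Str.join "" pdb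

-- ===== PORT B =====
-- one parsed ATOM record: (resnum, resname, atomname, line + '\n')
def fixHisParse (l : String) : String × String × String × String :=
  (PySem.Str.slice l (some 22) (some 26), PySem.Str.slice l (some 17) (some 20),
   PySem.Str.strip (PySem.Str.slice l (some 12) (some 16)), l ++ "\n")

-- body of B's grouping loop: state = (blocks, cur); `if cur and cur[-1][0] != a[0]`
def fixHisGroupStep
    (st : List (List (String × String × String × String)) × List (String × String × String × String))
    (a : String × String × String × String) :
    List (List (String × String × String × String)) × List (String × String × String × String) :=
  let (blocks, cur) := st
  match cur.getLast? with
  | some c => if c.1 ≠ a.1 then (blocks ++ [cur], [a]) else (blocks, cur ++ [a])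
  | none => (blocks, cur ++ [a])

-- B's per-block classification and rendering
def fixHisRender (block : List (String × String × String × String)) : List String :=
  match block.getLast? with
  | some last =>
      if last.2.1 = "HIS" then
        let d := block.any (fun t => t.2.1 == "HIS" && t.2.2.1 == "HD1")
        let e := block.any (fun t => t.2.1 == "HIS" && t.2.2.1 == "HE2")
        let his := if d && e then "HIP" else if e then "HIE" else "HID"
        block.map (fun t => PySem.Str.replace t.2.2.2 "HIS" his)
      else block.map (fun t => t.2.2.2)
  | none => block.map (fun t => t.2.2.2)

def fix_his_alt (pdb_str : String) : String :=
  let atoms := ((PySem.List.slice ((PySem.Str.split? pdb_str "\n").getD []) none (some (-1))).filter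
      (fun l => PySem.Str.startswith l "ATOM")).map fixHisParse
  let (blocks, cur) := atoms.foldl fixHisGroupStep ([], [])
  let blocks := if cur ≠ [] then blocks ++ [cur] else blocks
  let out := blocks.foldl (fun out b => out ++ fixHisRender b) []
  PySem.Str.join "" out

-- ===== PRECONDITION & SPEC =====
-- A returns normally on every string; this precondition excludes nothing (a substring
-- count never exceeds the string's length), so the claim covers all of Dom.
def Pre_fix_his (pdb_str : String) : Prop :=
  PySem.Str.count pdb_str "ATOM" ≤ PySem.Str.len pdb_str ∧
    PySem.Str.count pdb_str "HIS" ≤ PySem.Str.len pdb_str ∧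
    PySem.Str.count pdb_str "HD1" ≤ PySem.Str.len pdb_str
instance (pdb_str : String) : Decidable (Pre_fix_his pdb_str) := by unfold Pre_fix_his; infer_instance
def pvWitness_fix_his : String :=
  "ATOM      1  ND1 HIS A   1
ATOM      2  HD1 HIS A   1
ATOM      3  N   ALA A   2
"

def Spec_fix_his (pdb_str : String) (out : String) : Prop := out = fix_his_alt pdb_str
instance (pdb_str : String) (out : String) : Decidable (Spec_fix_his pdb_str out) := by unfold Spec_fix_his; infer_instance

-- ===== CLAIM (what is proved, stated in full; the proofs are below) =====
def Claim_equal_fix_his : Prop := ∀ (pdb_str : String), Dom_fix_his pdb_str → Pre_fix_his pdb_str → Spec_fix_his pdb_str (fix_his pdb_str)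

-- ===== LEMMAS AND PROOFS =====

-- A's loop body rewritten on a parsed record (same computation, fields precomputed)
def fixHisStepT (st : String × String × List String × List String × Int × Int)
    (t : String × String × String × String) : String × String × List String × List String × Int × Int :=
  let (old_resnum, old_res, residues, pdb, d, e) := st
  let (residues, pdb, d, e) :=
    if t.1 ≠ old_resnum ∧ old_resnum ≠ "undef" then
      let residues := if old_res = "HIS" then fixHisRelabel d e residues else residues
      (([] : List String), pdb ++ residues, (0 : Int), (0 : Int))
    else (residues, pdb, d, e)
  let (d, e) :=
    if t.2.1 = "HIS" then
      if t.2.2.1 = "HD1" then ((1 : Int), e)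
      else if t.2.2.1 = "HE2" then (d, (1 : Int))
      else (d, e)
    else (d, e)
  (t.1, t.2.1, residues ++ [t.2.2.2], pdb, d, e)

def fixHisDflag (b : List (String × String × String × String)) : Int :=
  if b.any (fun t => t.2.1 == "HIS" && t.2.2.1 == "HD1") then 1 else 0

def fixHisEflag (b : List (String × String × String × String)) : Int :=
  if b.any (fun t => t.2.1 == "HIS" && t.2.2.1 == "HE2") then 1 else 0

set_option maxHeartbeats 1000000 in
theorem fixHisStep_eq (st : String × String × List String × List String × Int × Int)
    (l : String) :
    fixHisStep st l =
      if PySem.Str.startswith l "ATOM" then fixHisStepT st (fixHisParse l) else st := by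
  obtain ⟨a, b, c, d, e, f⟩ := st
  simp [fixHisStep, fixHisStepT, fixHisParse]

-- lines of a block
def fixHisLines (b : List (String × String × String × String)) : List String :=
  b.map (fun t => t.2.2.2)

theorem fixHisRender_eq (cur : List (String × String × String × String))
    (c : String × String × String × String) (hc : cur.getLast? = some c) :
    (if c.2.1 = "HIS" then fixHisRelabel (fixHisDflag cur) (fixHisEflag cur) (fixHisLines cur)
     else fixHisLines cur) = fixHisRender cur := by
  unfold fixHisRender
  rw [hc]
  by_cases h : c.2.1 = "HIS" <;> simp only [h, if_true, if_false, ite_true, ite_false]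
  · by_cases hd : cur.any (fun t => t.2.1 == "HIS" && t.2.2.1 == "HD1") <;>
      by_cases he : cur.any (fun t => t.2.1 == "HIS" && t.2.2.1 == "HE2") <;>
      simp [fixHisRelabel, fixHisDflag, fixHisEflag, fixHisLines, hd, he, List.map_map,
        Function.comp]
  · simp [fixHisLines]

theorem fixHisGroupStep_ne (st : List (List (String × String × String × String)) ×
    List (String × String × String × String)) (a : String × String × String × String) :
    (fixHisGroupStep st a).2 ≠ [] := by
  obtain ⟨blocks, cur⟩ := st
  rcases h : cur.getLast? with _ | c
  · simp [fixHisGroupStep, h]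
  · by_cases h1 : c.1 = a.1 <;> simp [fixHisGroupStep, h, h1]

-- every element of the current group came from the input (generalized start state)
theorem fixHisGroup_mem (ts : List (String × String × String × String))
    (st : List (List (String × String × String × String)) ×
      List (String × String × String × String)) :
    ∀ t ∈ (ts.foldl fixHisGroupStep st).2, t ∈ st.2 ∨ t ∈ ts := by
  induction ts generalizing st with
  | nil => intro t ht; exact Or.inl ht
  | cons a ts ih =>
    intro t ht
    rcases ih (fixHisGroupStep st a) t ht with h | h
    · obtain ⟨blocks, cur⟩ := st
      rcases hcl : cur.getLast? with _ | c
      · simp [fixHisGroupStep, hcl] at h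
        rcases h with h | h
        · exact Or.inl h
        · exact Or.inr (by simp [h])
      · by_cases h1 : c.1 = a.1 <;> simp [fixHisGroupStep, hcl, h1] at h
        · rcases h with h | h
          · exact Or.inl h
          · exact Or.inr (by simp [h])
        · exact Or.inr (by simp [h])
    · exact Or.inr (List.mem_cons_of_mem _ h)

-- the current-group component is nonempty once any element was processed
theorem fixHisGroup_cur_ne (ts : List (String × String × String × String)) (hts : ts ≠ [])
    (st : List (List (String × String × String × String)) ×
      List (String × String × String × String)) :
    (ts.foldl fixHisGroupStep st).2 ≠ [] := by
  induction ts generalizing st with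
  | nil => exact absurd rfl hts
  | cons a ts ih =>
    rcases eq_or_ne ts [] with rfl | h
    · simpa using fixHisGroupStep_ne st a
    · exact ih h _

theorem fixHisOut_eq (bs : List (List (String × String × String × String)))
    (init : List String) :
    bs.foldl (fun out b => out ++ fixHisRender b) init = init ++ bs.flatMap fixHisRender := by
  induction bs generalizing init with
  | nil => simp
  | cons b bs ih => simp [ih, List.append_assoc]

-- A's step from the initial state: first line of the input opens the first group
theorem fixHisStepT_init (a : String × String × String × String) :
    fixHisStepT ("undef", "UNK", [], [], 0, 0) a =
      (a.1, a.2.1, [a.2.2.2], [], fixHisDflag [a], fixHisEflag [a]) := by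
  by_cases h1 : a.2.1 = "HIS" <;> by_cases h2 : a.2.2.1 = "HD1" <;>
    by_cases h3 : a.2.2.1 = "HE2" <;>
    simp_all [fixHisStepT, fixHisDflag, fixHisEflag]

-- A's step within the current group (same resnum): no flush, flags accumulate
theorem fixHisStepT_same (o r : String) (residues pdb : List String) (d e : Int)
    (a : String × String × String × String) (heq : a.1 = o) :
    fixHisStepT (o, r, residues, pdb, d, e) a =
      (a.1, a.2.1, residues ++ [a.2.2.2], pdb,
        if a.2.1 = "HIS" ∧ a.2.2.1 = "HD1" then 1 else d,
        if a.2.1 = "HIS" ∧ a.2.2.1 = "HE2" then 1 else e) := by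
  by_cases h1 : a.2.1 = "HIS" <;> by_cases h2 : a.2.2.1 = "HD1" <;>
    by_cases h3 : a.2.2.1 = "HE2" <;>
    simp_all [fixHisStepT]

-- A's step on a resnum change: flush the buffered residue, reset, open a new group
theorem fixHisStepT_flush (o r : String) (residues pdb : List String) (d e : Int)
    (a : String × String × String × String) (ho : o ≠ "undef") (hne : a.1 ≠ o) :
    fixHisStepT (o, r, residues, pdb, d, e) a =
      (a.1, a.2.1, [a.2.2.2],
        pdb ++ (if r = "HIS" then fixHisRelabel d e residues else residues),
        fixHisDflag [a], fixHisEflag [a]) := by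
  by_cases h1 : a.2.1 = "HIS" <;> by_cases h2 : a.2.2.1 = "HD1" <;>
    by_cases h3 : a.2.2.1 = "HE2" <;>
    simp_all [fixHisStepT, fixHisDflag, fixHisEflag]

theorem fixHisDflag_append (cur : List (String × String × String × String))
    (a : String × String × String × String) :
    fixHisDflag (cur ++ [a]) =
      if a.2.1 = "HIS" ∧ a.2.2.1 = "HD1" then 1 else fixHisDflag cur := by
  unfold fixHisDflag
  rw [List.any_append]
  by_cases hb : (a.2.1 == "HIS" && a.2.2.1 == "HD1") = true
  · have hp : a.2.1 = "HIS" ∧ a.2.2.1 = "HD1" := by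
      simpa [Bool.and_eq_true, beq_iff_eq] using hb
    simp [hb, hp]
  · have hp : ¬(a.2.1 = "HIS" ∧ a.2.2.1 = "HD1") := by
      simpa [Bool.and_eq_true, beq_iff_eq] using hb
    rw [Bool.not_eq_true] at hb
    simp only [List.any_cons, List.any_nil, hb, Bool.or_false]
    simp [hp]

theorem fixHisEflag_append (cur : List (String × String × String × String))
    (a : String × String × String × String) :
    fixHisEflag (cur ++ [a]) =
      if a.2.1 = "HIS" ∧ a.2.2.1 = "HE2" then 1 else fixHisEflag cur := by
  unfold fixHisEflag
  rw [List.any_append]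
  by_cases hb : (a.2.1 == "HIS" && a.2.2.1 == "HE2") = true
  · have hp : a.2.1 = "HIS" ∧ a.2.2.1 = "HE2" := by
      simpa [Bool.and_eq_true, beq_iff_eq] using hb
    simp [hb, hp]
  · have hp : ¬(a.2.1 = "HIS" ∧ a.2.2.1 = "HE2") := by
      simpa [Bool.and_eq_true, beq_iff_eq] using hb
    rw [Bool.not_eq_true] at hb
    simp only [List.any_cons, List.any_nil, hb, Bool.or_false]
    simp [hp]

theorem fixHisGroupStep_eval
    (st : List (List (String × String × String × String)) ×
      List (String × String × String × String))
    (a c : String × String × String × String) (hc : st.2.getLast? = some c) :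
    fixHisGroupStep st a =
      if c.1 = a.1 then (st.1, st.2 ++ [a]) else (st.1 ++ [st.2], [a]) := by
  obtain ⟨blocks, cur⟩ := st
  by_cases hk : c.1 = a.1 <;> simp_all [fixHisGroupStep]

-- MAIN INVARIANT: A's streaming state after any prefix, read off B's grouping state
theorem fixHis_inv (ts : List (String × String × String × String))
    (h : ∀ t ∈ ts, t.1 ≠ "undef") (hts : ts ≠ [])
    (c : String × String × String × String)
    (hc : (ts.foldl fixHisGroupStep ([], [])).2.getLast? = some c) :
    ts.foldl fixHisStepT ("undef", "UNK", [], [], 0, 0) =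
      (c.1, c.2.1, fixHisLines (ts.foldl fixHisGroupStep ([], [])).2,
        ((ts.foldl fixHisGroupStep ([], [])).1).flatMap fixHisRender,
        fixHisDflag (ts.foldl fixHisGroupStep ([], [])).2,
        fixHisEflag (ts.foldl fixHisGroupStep ([], [])).2) := by
  induction ts using List.reverseRecOn generalizing c with
  | nil => exact absurd rfl hts
  | append_singleton ts a ih =>
    rcases eq_or_ne ts [] with rfl | hne
    · have hG : ([a].foldl fixHisGroupStep ([], [])) = ([], [a]) := by
        simp [fixHisGroupStep]
      rw [List.nil_append] at hc ⊢
      rw [hG] at hc ⊢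
      simp only [List.getLast?_singleton, Option.some.injEq] at hc
      subst hc
      simp [fixHisStepT_init, fixHisLines]
    · have hcur := fixHisGroup_cur_ne ts hne ([], [])
      obtain ⟨c', hc'⟩ : ∃ c', (ts.foldl fixHisGroupStep ([], [])).2.getLast? = some c' := by
        cases hl : (ts.foldl fixHisGroupStep ([], [])).2.getLast? with
        | none => exact absurd (List.getLast?_eq_none_iff.mp hl) hcur
        | some c' => exact ⟨c', rfl⟩
      have hmem : c' ∈ ts := by
        have := List.mem_of_getLast? hc'
        rcases fixHisGroup_mem ts ([], []) c' this with h0 | h0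
        · simp at h0
        · exact h0
      have IH := ih (fun t ht => h t (List.mem_append_left _ ht)) hne c' hc'
      simp only [List.foldl_append, List.foldl_cons, List.foldl_nil] at hc ⊢
      rw [fixHisGroupStep_eval _ a c' hc'] at hc ⊢
      rw [IH]
      by_cases hk : c'.1 = a.1
      · rw [if_pos hk] at hc ⊢
        rw [List.getLast?_concat] at hc
        injection hc with hc; subst hc
        rw [fixHisStepT_same _ _ _ _ _ _ _ hk.symm]
        simp [fixHisLines, fixHisDflag_append, fixHisEflag_append]
      · rw [if_neg hk] at hc ⊢
        simp only [List.getLast?_singleton, Option.some.injEq] at hc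
        subst hc
        rw [fixHisStepT_flush _ _ _ _ _ _ _ (h c' (List.mem_append_left _ hmem)) (fun he => hk he.symm)]
        rw [fixHisRender_eq _ _ hc']
        simp [fixHisLines]

-- a [22:26] slice has length at most 4, so it is never the sentinel 'undef'
theorem fixHisKey_ne (l : String) : PySem.Str.slice l (some 22) (some 26) ≠ "undef" := by
  intro hEq
  have h5 : (PySem.Str.slice l (some 22) (some 26)).toList.length = 5 := by rw [hEq]; rfl
  have h22 : (22 : Int) = ((22 : Nat) : Int) := by norm_num
  have h26 : (26 : Int) = ((26 : Nat) : Int) := by norm_num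
  rw [PySem.Str.toList_slice] at h5
  simp only [PySem.Chars.slice_eq_listSlice, h22, h26, PySem.List.slice_natCast] at h5
  simp [List.length_take] at h5
  omega

-- A's fold over all lines is its fold over the ATOM lines, on parsed records
theorem fixHisFold_eq (L : List String) :
    L.foldl fixHisStep ("undef", "UNK", [], [], 0, 0) =
      ((L.filter (fun l => PySem.Str.startswith l "ATOM")).map fixHisParse).foldl
        fixHisStepT ("undef", "UNK", [], [], 0, 0) := by
  rw [List.foldl_map, List.foldl_filter]
  have hstep : fixHisStep = fun st l =>
      if PySem.Str.startswith l "ATOM" then fixHisStepT st (fixHisParse l) else st :=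
    funext fun st => funext fun l => fixHisStep_eq st l
  rw [hstep]

theorem fixHisCore (L : List String) :
    (let st := L.foldl fixHisStep ("undef", "UNK", [], [], 0, 0)
     let (_old_resnum, old_res, residues, pdb, d, e) := st
     let pdb :=
       if residues.length > 0 then
         pdb ++ (if old_res = "HIS" then fixHisRelabel d e residues else residues)
       else pdb
     PySem.Str.join "" pdb) =
    (let atoms := (L.filter (fun l => PySem.Str.startswith l "ATOM")).map fixHisParse
     let (blocks, cur) := atoms.foldl fixHisGroupStep ([], [])
     let blocks := if cur ≠ [] then blocks ++ [cur] else blocks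
     let out := blocks.foldl (fun out b => out ++ fixHisRender b) []
     PySem.Str.join "" out) := by
  simp only
  rw [fixHisFold_eq]
  rcases eq_or_ne ((L.filter (fun l => PySem.Str.startswith l "ATOM")).map fixHisParse) []
    with h0 | h0
  · rw [h0]
    simp
  · have hkeys : ∀ t ∈ (L.filter (fun l => PySem.Str.startswith l "ATOM")).map fixHisParse,
        t.1 ≠ "undef" := by
      intro t ht
      obtain ⟨l, _, rfl⟩ := List.mem_map.mp ht
      exact fixHisKey_ne l
    have hcur := fixHisGroup_cur_ne _ h0 ([], [])
    obtain ⟨c, hc⟩ : ∃ c,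
        (((L.filter (fun l => PySem.Str.startswith l "ATOM")).map fixHisParse).foldl
          fixHisGroupStep ([], [])).2.getLast? = some c := by
      cases hl : (((L.filter (fun l => PySem.Str.startswith l "ATOM")).map fixHisParse).foldl
          fixHisGroupStep ([], [])).2.getLast? with
      | none => exact absurd (List.getLast?_eq_none_iff.mp hl) hcur
      | some c => exact ⟨c, rfl⟩
    rw [fixHis_inv _ hkeys h0 c hc]
    simp only
    rw [fixHisRender_eq _ _ hc]
    have hlen : 0 < (fixHisLines (((L.filter (fun l => PySem.Str.startswith l "ATOM")).map
        fixHisParse).foldl fixHisGroupStep ([], [])).2).length := by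
      simp [fixHisLines]
      exact List.length_pos_iff.mpr hcur
    rw [if_pos hlen, if_pos hcur]
    rw [fixHisOut_eq]
    simp

-- ===== VERDICT (by name: the statement is the Claim_ definition above) =====
theorem fix_his_spec : Claim_equal_fix_his := by
  intro s _ _
  show fix_his s = fix_his_alt s
  exact fixHisCore _
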